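-- pv_equiv track=rewrite | github.com/pacospace/Advent_of_Code | 2017/day12_Digital_Plumber/day12part2.py | parse_pipes
-- ===== SOURCE A (Python) =====
-- def parse_pipes(p_dict, p_trace, prog_id, l, trace_l):
--
--     trace_l.append([prog_id, l])
--     l += 1
--     p_trace.add(prog_id)
--
--     for q in p_dict[prog_id]:
--
--         if q not in p_trace:
--
--             parse_pipes(p_dict, p_trace, q, l, trace_l)
--
--         else:
--
--             trace_l.append([q, l])
--             pass
--
--     return p_trace, trace_l
-- ===== SOURCE B (Python) =====
-- def parse_pipes(p_dict, p_trace, prog_id, l, trace_l):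
--     # Iterative DFS: explicit stack of (neighbor-iterator, child-level) frames
--     # instead of recursion; same visited set, same pre-order trace.
--     trace_l.append([prog_id, l])
--     p_trace.add(prog_id)
--     stack = [(iter(p_dict[prog_id]), l + 1)]
--     while stack:
--         it, level = stack[-1]
--         q = next(it, None)
--         if q is None:
--             stack.pop()
--             continue
--         trace_l.append([q, level])
--         if q not in p_trace:
--             p_trace.add(q)
--             stack.append((iter(p_dict[q]), level + 1))
--     return p_trace, trace_l
-- ===== Notes on version B (the rewrite author's own statement) =====
-- stated objective: alternative
-- what changed: The recursive DFS is replaced by an iterative DFS over an explicit stack of (neighbor-iterator, child-level) frames, preserving the exact pre-order trace, depth labels and interleaved already-visited appends, and avoiding Python's recursion limit.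
import Mathlib
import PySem

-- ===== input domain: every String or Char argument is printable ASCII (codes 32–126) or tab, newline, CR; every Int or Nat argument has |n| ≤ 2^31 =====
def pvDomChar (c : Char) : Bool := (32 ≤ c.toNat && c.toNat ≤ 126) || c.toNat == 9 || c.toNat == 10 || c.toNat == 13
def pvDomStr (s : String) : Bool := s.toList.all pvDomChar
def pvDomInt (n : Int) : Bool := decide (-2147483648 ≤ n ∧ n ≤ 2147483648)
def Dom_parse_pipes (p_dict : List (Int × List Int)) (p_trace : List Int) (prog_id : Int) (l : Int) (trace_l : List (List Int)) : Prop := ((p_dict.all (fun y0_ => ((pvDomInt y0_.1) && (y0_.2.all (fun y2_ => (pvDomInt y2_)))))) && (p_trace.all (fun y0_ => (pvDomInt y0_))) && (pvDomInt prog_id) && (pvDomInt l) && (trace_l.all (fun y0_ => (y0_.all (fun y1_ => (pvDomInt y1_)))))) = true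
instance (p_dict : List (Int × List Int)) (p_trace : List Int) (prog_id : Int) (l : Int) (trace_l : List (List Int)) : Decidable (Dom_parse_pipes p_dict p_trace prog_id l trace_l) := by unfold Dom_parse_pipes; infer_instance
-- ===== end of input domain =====

-- B replaces A's recursive DFS by an iterative DFS over an explicit stack of
-- (remaining-neighbours, child-level) frames; same visited set and identical trace.
-- Equivalence is about the RETURN value; both Pythons mutate p_trace/trace_l identically.

-- ===== PORT A =====
-- A's recursion is ported with an internal fuel guard (p_dict.length + 1 nesting
-- levels always suffice: each nested call is on a fresh, unvisited key); the
-- for-loop over the neighbour list is the fold over the mutated (set, trace) state.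
def parse_pipes_go (p_dict : List (Int × List Int)) :
    Nat → List Int → Int → Int → List (List Int) → List Int × List (List Int)
  | 0, p_trace, _, _, trace_l => (p_trace, trace_l)   -- fuel guard, unreachable under Pre_
  | Nat.succ f, p_trace, prog_id, l, trace_l =>
      ((p_dict.lookup prog_id).getD []).foldl
        (fun r q =>
          if q ∈ r.1 then (r.1, r.2 ++ [[q, l + 1]])
          else parse_pipes_go p_dict f r.1 q (l + 1) r.2)
        (PySem.Set.add p_trace prog_id, trace_l ++ [[prog_id, l]])

def parse_pipes (p_dict : List (Int × List Int)) (p_trace : List Int) (prog_id : Int) (l : Int) (trace_l : List (List Int)) : List Int × List (List Int) :=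
  parse_pipes_go p_dict (p_dict.length + 1) p_trace prog_id l trace_l

-- ===== PORT B =====
-- largest neighbour-list length in p_dict (fuel bookkeeping only)
def pvMaxLen (p_dict : List (Int × List Int)) : Nat :=
  p_dict.foldr (fun kv m => max kv.2.length m) 0

-- weight of a frame stack = upper bound on the number of loop steps still to run
def pvStackW (K : Nat) : List (List Int × Int × Nat) → Nat
  | [] => 0
  | (qs, _, f) :: rest => (qs.length + 1) * K ^ f + pvStackW K rest

-- iterative DFS: the top frame holds the not-yet-consumed neighbours (Python: the
-- frame's iterator) and their level; the frame's Nat and the first argument are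
-- fuel guards, unreachable under Pre_ for the fuel parse_pipes_alt supplies.
def parse_pipes_alt_run (p_dict : List (Int × List Int)) :
    Nat → List Int → List (List Int) → List (List Int × Int × Nat) → List Int × List (List Int)
  | _, p_trace, trace_l, [] => (p_trace, trace_l)
  | 0, p_trace, trace_l, _ => (p_trace, trace_l)          -- step-fuel guard
  | Nat.succ s, p_trace, trace_l, (qs, lvl, f) :: rest =>
      match qs with
      | [] => parse_pipes_alt_run p_dict s p_trace trace_l rest   -- iterator exhausted: pop
      | q :: qs' =>
          if q ∈ p_trace then
            parse_pipes_alt_run p_dict s p_trace (trace_l ++ [[q, lvl]]) ((qs', lvl, f) :: rest)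
          else
            match f with
            | 0 => parse_pipes_alt_run p_dict s p_trace trace_l ((qs', lvl, 0) :: rest)  -- depth-fuel guard
            | Nat.succ f' =>
                parse_pipes_alt_run p_dict s (PySem.Set.add p_trace q) (trace_l ++ [[q, lvl]])
                  (((p_dict.lookup q).getD [], lvl + 1, f') :: (qs', lvl, Nat.succ f') :: rest)

def parse_pipes_alt (p_dict : List (Int × List Int)) (p_trace : List Int) (prog_id : Int) (l : Int) (trace_l : List (List Int)) : List Int × List (List Int) :=
  let stack0 : List (List Int × Int × Nat) := [((p_dict.lookup prog_id).getD [], l + 1, p_dict.length)]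
  parse_pipes_alt_run p_dict (pvStackW (pvMaxLen p_dict + 2) stack0)
    (PySem.Set.add p_trace prog_id) (trace_l ++ [[prog_id, l]]) stack0

-- ===== PRECONDITION & SPEC =====
-- ids reachable from prog_id along pipe edges whose targets avoid p_trace
-- (a path's intermediate nodes are keys, so p_dict.length + 1 closure rounds reach a fixed point)
def pvReach (p_dict : List (Int × List Int)) (p_trace : List Int) (prog_id : Int) : List Int :=
  (List.range (p_dict.length + 1)).foldl
    (fun S _ => S.foldl
      (fun T v => ((p_dict.lookup v).getD []).foldl
        (fun T w => if w ∈ p_trace ∨ w ∈ T then T else T ++ [w]) T)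
      S)
    [prog_id]

-- Pre_: every id the traversal can reach (prog_id, and recursively every neighbour
-- not already in p_trace) is a key of p_dict — exactly the inputs on which the
-- Python returns instead of raising KeyError.
def Pre_parse_pipes (p_dict : List (Int × List Int)) (p_trace : List Int) (prog_id : Int) (l : Int) (trace_l : List (List Int)) : Prop :=
  ∀ u ∈ pvReach p_dict p_trace prog_id, (p_dict.any (fun kv => kv.1 == u)) = true
instance (p_dict : List (Int × List Int)) (p_trace : List Int) (prog_id : Int) (l : Int) (trace_l : List (List Int)) : Decidable (Pre_parse_pipes p_dict p_trace prog_id l trace_l) := by unfold Pre_parse_pipes; infer_instance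

def pvWitness_parse_pipes : (List (Int × List Int)) × List Int × Int × Int × List (List Int) :=
  ([(0, [1, 2]), (1, [0]), (2, [2])], [], 0, 0, [])

def Spec_parse_pipes (p_dict : List (Int × List Int)) (p_trace : List Int) (prog_id : Int) (l : Int) (trace_l : List (List Int)) (out : List Int × List (List Int)) : Prop := out = parse_pipes_alt p_dict p_trace prog_id l trace_l
instance (p_dict : List (Int × List Int)) (p_trace : List Int) (prog_id : Int) (l : Int) (trace_l : List (List Int)) (out : List Int × List (List Int)) : Decidable (Spec_parse_pipes p_dict p_trace prog_id l trace_l out) := by unfold Spec_parse_pipes; infer_instance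

-- ===== CLAIM (what is proved, stated in full; the proofs are below) =====
def Claim_equal_parse_pipes : Prop := ∀ (p_dict : List (Int × List Int)) (p_trace : List Int) (prog_id : Int) (l : Int) (trace_l : List (List Int)), Dom_parse_pipes p_dict p_trace prog_id l trace_l → Pre_parse_pipes p_dict p_trace prog_id l trace_l → Spec_parse_pipes p_dict p_trace prog_id l trace_l (parse_pipes p_dict p_trace prog_id l trace_l)

-- ===== LEMMAS AND PROOFS =====

theorem pvLookup_len_le (p_dict : List (Int × List Int)) (q : Int) :
    ((p_dict.lookup q).getD []).length ≤ pvMaxLen p_dict := by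
  induction p_dict with
  | nil => simp [List.lookup, pvMaxLen]
  | cons kv rest ih =>
      simp only [List.lookup, pvMaxLen, List.foldr_cons]
      split
      · simp
      · exact le_trans ih (by simp [pvMaxLen])

-- the recursive reading of a frame stack: run A's neighbour loop on each frame in turn
def pvUnwind (p_dict : List (Int × List Int)) :
    List (List Int × Int × Nat) → List Int → List (List Int) → List Int × List (List Int)
  | [], pt, tl => (pt, tl)
  | (qs, lvl, f) :: rest, pt, tl =>
      let r := qs.foldl
        (fun r q =>
          if q ∈ r.1 then (r.1, r.2 ++ [[q, lvl]])
          else parse_pipes_go p_dict f r.1 q lvl r.2)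
        (pt, tl)
      pvUnwind p_dict rest r.1 r.2

-- the stack machine, given enough step fuel, computes exactly the unwinding of its
-- frames through A's neighbour loop
theorem pvRun_eq_unwind (p_dict : List (Int × List Int)) (s : Nat) :
    ∀ (stack : List (List Int × Int × Nat)) (pt : List Int) (tl : List (List Int)),
    pvStackW (pvMaxLen p_dict + 2) stack ≤ s →
    parse_pipes_alt_run p_dict s pt tl stack = pvUnwind p_dict stack pt tl := by
  induction s with
  | zero =>
      intro stack pt tl hW
      match stack with
      | [] => rfl
      | (qs, lvl, f) :: rest =>
          exfalso
          have h1 : 0 < (pvMaxLen p_dict + 2) ^ f := Nat.pow_pos (by omega)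
          simp only [pvStackW, Nat.add_mul] at hW
          omega
  | succ s ih =>
      intro stack pt tl hW
      match stack with
      | [] => rfl
      | ([], lvl, f) :: rest =>
          have h1 : 0 < (pvMaxLen p_dict + 2) ^ f := Nat.pow_pos (by omega)
          simp [pvStackW] at hW
          rw [show parse_pipes_alt_run p_dict (s+1) pt tl (([], lvl, f) :: rest)
                = parse_pipes_alt_run p_dict s pt tl rest from rfl,
              ih rest pt tl (by omega)]
          simp [pvUnwind]
      | ((q :: qs'), lvl, f) :: rest =>
          by_cases hq : q ∈ pt
          · have h1 : 0 < (pvMaxLen p_dict + 2) ^ f := Nat.pow_pos (by omega)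
            simp [pvStackW, Nat.add_mul] at hW
            rw [show parse_pipes_alt_run p_dict (s+1) pt tl ((q :: qs', lvl, f) :: rest)
                  = parse_pipes_alt_run p_dict s pt (tl ++ [[q, lvl]]) ((qs', lvl, f) :: rest) from by
                    simp [parse_pipes_alt_run, hq],
                ih _ _ _ (by simp [pvStackW, Nat.add_mul]; omega)]
            simp [pvUnwind, List.foldl_cons, hq]
          · match f with
            | 0 =>
                simp [pvStackW] at hW
                rw [show parse_pipes_alt_run p_dict (s+1) pt tl ((q :: qs', lvl, 0) :: rest)
                      = parse_pipes_alt_run p_dict s pt tl ((qs', lvl, 0) :: rest) from by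
                        simp [parse_pipes_alt_run, hq],
                    ih _ _ _ (by simp [pvStackW]; omega)]
                simp [pvUnwind, List.foldl_cons, hq, parse_pipes_go]
            | Nat.succ f' =>
                have h1 : 0 < (pvMaxLen p_dict + 2) ^ f' := Nat.pow_pos (by omega)
                have hg : ((p_dict.lookup q).getD []).length ≤ pvMaxLen p_dict :=
                  pvLookup_len_le p_dict q
                have hmul : (((p_dict.lookup q).getD []).length + 1) * (pvMaxLen p_dict + 2) ^ f'
                    < (pvMaxLen p_dict + 2) ^ (f' + 1) := by
                  rw [pow_succ]
                  nlinarith [hg, h1]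
                simp only [pvStackW, Nat.add_mul, List.length_cons, pow_succ] at hW
                rw [show parse_pipes_alt_run p_dict (s+1) pt tl ((q :: qs', lvl, f' + 1) :: rest)
                      = parse_pipes_alt_run p_dict s (PySem.Set.add pt q) (tl ++ [[q, lvl]])
                          (((p_dict.lookup q).getD [], lvl + 1, f') :: (qs', lvl, f' + 1) :: rest) from by
                        simp [parse_pipes_alt_run, hq],
                    ih _ _ _ (by
                      simp only [pvStackW, Nat.add_mul, pow_succ] at hmul ⊢
                      omega)]
                simp only [pvUnwind, List.foldl_cons]
                rw [if_neg hq]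
                simp [parse_pipes_go]

-- ===== VERDICT (by name: the statement is the Claim_ definition above) =====
theorem parse_pipes_spec : Claim_equal_parse_pipes := by
  intro p_dict p_trace prog_id l trace_l _ _
  unfold Spec_parse_pipes parse_pipes parse_pipes_alt
  rw [pvRun_eq_unwind _ _ _ _ _ (le_refl _)]
  simp [pvUnwind, parse_pipes_go]
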